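-- pv_equiv track=rewrite | github.com/rgov/starter-pack | starterpack/build.py | _keybinds_serialiser
-- ===== SOURCE A (Python) =====
-- import collections
--
-- def _keybinds_serialiser(lines):
--     """Turn lines into an ordered dict, to preserve structure of file."""
--     od, lastkey = collections.OrderedDict(), None
--     for line in (l.strip() for l in lines):
--         if line and line.startswith('[BIND:'):
--             od[line], lastkey = [], line
--         elif line:
--             if lastkey is not None:
--                 od[lastkey].append(line)
--     return od
-- ===== SOURCE B (Python) =====
-- import collections
--
-- def _keybinds_serialiser(lines):
--     """Consume the stripped, non-empty lines chunk by chunk from a deque: at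
--     each '[BIND:' header pop the whole span of following non-header lines as
--     its body; OrderedDict(pairs) then realises first-position/last-value
--     semantics for duplicate headers. No per-line lastkey state machine."""
--     ls = collections.deque(l for l in (x.strip() for x in lines) if l)
--     pairs = []
--     while ls:
--         first = ls.popleft()
--         if first.startswith('[BIND:'):
--             body = []
--             while ls and not ls[0].startswith('[BIND:'):
--                 body.append(ls.popleft())
--             pairs.append((first, body))
--     return collections.OrderedDict(pairs)
-- ===== Notes on version B (the rewrite author's own statement) =====
-- stated objective: alternative
-- what changed: B replaces A's per-line state machine (mutating an OrderedDict under a running lastkey) with chunk-wise consumption from a deque of the stripped non-empty lines: each '[BIND:' header is popped together with the whole span of non-header lines after it as one (header, body) pair, pre-header lines are discarded, and the ordered dict is built once at the end from the pair list, relying on OrderedDict's first-position/last-value duplicate rule.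
import Mathlib
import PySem

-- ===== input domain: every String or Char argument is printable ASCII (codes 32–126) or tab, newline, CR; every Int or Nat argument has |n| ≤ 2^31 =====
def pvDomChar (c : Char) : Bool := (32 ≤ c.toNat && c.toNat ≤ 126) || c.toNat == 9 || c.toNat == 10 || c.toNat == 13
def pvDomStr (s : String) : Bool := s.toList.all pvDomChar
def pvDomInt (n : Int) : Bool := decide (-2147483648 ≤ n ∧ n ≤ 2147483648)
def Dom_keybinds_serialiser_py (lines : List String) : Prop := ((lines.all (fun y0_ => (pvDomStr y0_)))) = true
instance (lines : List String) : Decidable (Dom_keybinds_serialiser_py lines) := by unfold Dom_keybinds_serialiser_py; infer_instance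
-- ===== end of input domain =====

-- B consumes the stripped non-empty lines chunk by chunk (a header plus the
-- whole span of non-header lines after it at a time) instead of A's per-line
-- lastkey state machine; objective: alternative decomposition, same cost.

-- the header test line.startswith('[BIND:') both Pythons use
def pvHdr (l : String) : Bool := PySem.Str.startswith l "[BIND:"

-- ===== PORT A =====
-- A's loop state: (ordered dict, lastkey); one pass over the stripped lines.
def pvAStep (st : PySem.Dict String (List String) × Option String) (line : String) :
    PySem.Dict String (List String) × Option String :=
  if line ≠ "" ∧ pvHdr line = true then
    (st.1.insert line [], some line)
  else if line ≠ "" then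
    match st.2 with
    | some k => (st.1.modify k [] (fun v => v ++ [line]), st.2)
    | none => st
  else st

def keybinds_serialiser_py (lines : List String) : List (String × List String) :=
  (((lines.map (fun l => PySem.Str.strip l)).foldl pvAStep (PySem.Dict.empty, none)).1).items

-- ===== PORT B =====
-- B's while loop: take the head; on a header, grab the longest non-header
-- prefix of the rest as the body (the for/break loop = takeWhile), append the
-- (header, body) pair and jump past the body; otherwise skip the line.
def pvSegLoop (ls : List String) (pairs : List (String × List String)) : List (String × List String) :=
  match ls with
  | [] => pairs
  | first :: rest =>
    if pvHdr first = true then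
      pvSegLoop (rest.drop (rest.takeWhile (fun x => !pvHdr x)).length)
        (pairs ++ [(first, rest.takeWhile (fun x => !pvHdr x))])
    else pvSegLoop rest pairs
termination_by ls.length
decreasing_by
  · have hle := (List.takeWhile_sublist (l := rest) (p := fun x => !pvHdr x)).length_le
    simp only [List.length_drop, List.length_cons]; omega
  · simp

def keybinds_serialiser_py_alt (lines : List String) : List (String × List String) :=
  (PySem.Dict.ofList
    (pvSegLoop ((lines.map (fun l => PySem.Str.strip l)).filter (fun l => l ≠ "")) [])).items

-- ===== PRECONDITION & SPEC =====
def Spec_keybinds_serialiser_py (lines : List String) (out : List (String × List String)) : Prop := out = keybinds_serialiser_py_alt lines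
instance (lines : List String) (out : List (String × List String)) : Decidable (Spec_keybinds_serialiser_py lines out) := by unfold Spec_keybinds_serialiser_py; infer_instance

-- ===== CLAIM (what is proved, stated in full; the proofs are below) =====
def Claim_equal_keybinds_serialiser_py : Prop := ∀ (lines : List String), Dom_keybinds_serialiser_py lines → Spec_keybinds_serialiser_py lines (keybinds_serialiser_py lines)

-- ===== LEMMAS AND PROOFS =====

-- accumulator-free mirror of B's while loop, for the induction
def pvSegments : List String → List (String × List String)
  | [] => []
  | first :: rest =>
    if pvHdr first = true then
      (first, rest.takeWhile (fun x => !pvHdr x)) ::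
        pvSegments (rest.drop (rest.takeWhile (fun x => !pvHdr x)).length)
    else pvSegments rest
termination_by ls => ls.length
decreasing_by
  · have hle := (List.takeWhile_sublist (l := rest) (p := fun x => !pvHdr x)).length_le
    simp only [List.length_drop, List.length_cons]; omega
  · simp

lemma pvSegLoop_eq (ls : List String) (ps : List (String × List String)) :
    pvSegLoop ls ps = ps ++ pvSegments ls := by
  induction ls using pvSegments.induct generalizing ps with
  | case1 => simp [pvSegLoop, pvSegments]
  | case2 first rest h ih =>
    rw [pvSegLoop, pvSegments, if_pos h, if_pos h, ih]
    simp
  | case3 first rest h ih =>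
    rw [pvSegLoop, pvSegments, if_neg h, if_neg h, ih]

-- A's step is the identity on an empty line, so A's fold over the stripped
-- lines equals its fold over the non-empty stripped lines.
lemma pvA_fold_filter (ls : List String) (st : PySem.Dict String (List String) × Option String) :
    ls.foldl pvAStep st = (ls.filter (fun l => l ≠ "")).foldl pvAStep st := by
  induction ls generalizing st with
  | nil => rfl
  | cons l ls ih =>
    by_cases h : l = ""
    · subst h
      simpa [pvAStep, List.filter] using ih st
    · simp only [List.foldl_cons, List.filter_cons]
      simp [h, ih]

-- A over a span of non-empty non-header lines just appends them to key k's list.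
lemma pvBody (body : List String) (hb : ∀ x ∈ body, x ≠ "" ∧ pvHdr x = false)
    (d : PySem.Dict String (List String)) (k : String) (acc : List String) :
    body.foldl pvAStep (d.insert k acc, some k) = (d.insert k (acc ++ body), some k) := by
  induction body generalizing acc with
  | nil => simp
  | cons x xs ih =>
    obtain ⟨hne, hnh⟩ := hb x (by simp)
    have hstep : pvAStep (d.insert k acc, some k) x = (d.insert k (acc ++ [x]), some k) := by
      simp [pvAStep, hne, hnh, PySem.Dict.modify, PySem.Dict.getD_insert_self,
        PySem.Dict.insert_insert_self]
    rw [List.foldl_cons, hstep]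
    rw [ih (fun y hy => hb y (by simp [hy]))]
    simp

lemma pvDropWhile_head (p : String → Bool) :
    ∀ (ls : List String) (r : String) (t : List String),
      ls.dropWhile p = r :: t → p r = false := by
  intro ls r t h
  induction ls with
  | nil => simp [List.dropWhile] at h
  | cons a as ih =>
    rw [List.dropWhile_cons] at h
    by_cases ha : p a = true
    · rw [if_pos ha] at h; exact ih h
    · rw [if_neg ha] at h
      cases h
      simpa using ha

-- Main invariant: from state (d, none), A over non-empty lines produces
-- d updated with the segments, and lastkey = key of the last segment.
lemma pvMain : ∀ (ls : List String), (∀ x ∈ ls, x ≠ "") →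
    ∀ (d : PySem.Dict String (List String)),
      ls.foldl pvAStep (d, none) =
        (d.update (pvSegments ls), (pvSegments ls).getLast?.map (fun p => p.1)) := by
  intro ls
  induction ls using pvSegments.induct with
  | case1 => intro _ d; simp [pvSegments, PySem.Dict.update]
  | case2 first rest h ih =>
    intro hne d
    set body := rest.takeWhile (fun x => !pvHdr x) with hbody
    have hbodymem : ∀ x ∈ body, x ≠ "" ∧ pvHdr x = false := by
      intro x hx
      have hx' : x ∈ rest := (List.takeWhile_sublist _).subset hx
      refine ⟨hne x (by simp [hx']), ?_⟩
      have := List.mem_takeWhile_imp hx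
      simpa using this
    have hfirstne : first ≠ "" := hne first (by simp)
    have hstep : pvAStep (d, none) first = (d.insert first [], some first) := by
      simp [pvAStep, hfirstne, h]
    have hdrop : rest.drop body.length = rest.dropWhile (fun x => !pvHdr x) := by
      conv_lhs => rw [← List.takeWhile_append_dropWhile (p := fun x => !pvHdr x) (l := rest)]
      rw [hbody, List.drop_left]
    have hsplit : rest = body ++ rest.drop body.length := by
      rw [hdrop, hbody]
      exact List.takeWhile_append_dropWhile.symm
    rw [pvSegments, if_pos h]
    rw [List.foldl_cons, hstep]
    conv_lhs => rw [hsplit, List.foldl_append]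
    rw [pvBody body hbodymem d first []]
    simp only [List.nil_append]
    rcases hr : rest.drop body.length with _ | ⟨r, t⟩
    · simp only [List.foldl_nil, pvSegments, ← hbody]
      simp [PySem.Dict.update]
    · -- the remainder starts with a header line, so its first step overwrites lastkey
      have hhdr : pvHdr r = true := by
        have := pvDropWhile_head _ rest r t (by rw [← hdrop, hr])
        simpa using this
      have hstep2 : ∀ (o : Option String),
          pvAStep (d.insert first body, o) r = ((d.insert first body).insert r [], some r) := by
        intro o
        have hrne : r ≠ "" := hne r (by rw [hsplit, hr]; simp)
        simp [pvAStep, hrne, hhdr]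
      have hih := ih (fun x hx => hne x (by rw [hsplit]; simp [hx])) (d.insert first body)
      rw [hr] at hih
      have hsegne : pvSegments (r :: t) =
          (r, t.takeWhile (fun x => !pvHdr x)) ::
            pvSegments (t.drop (t.takeWhile (fun x => !pvHdr x)).length) := by
        rw [pvSegments, if_pos hhdr]
      rw [← hbody]
      calc (r :: t).foldl pvAStep (d.insert first body, some first)
          = t.foldl pvAStep ((d.insert first body).insert r [], some r) := by
            rw [List.foldl_cons, hstep2]
        _ = (r :: t).foldl pvAStep (d.insert first body, none) := by
            rw [List.foldl_cons, hstep2]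
        _ = ((d.insert first body).update (pvSegments (r :: t)),
              (pvSegments (r :: t)).getLast?.map (fun p => p.1)) := hih
        _ = (d.update ((first, body) :: pvSegments (r :: t)),
              ((first, body) :: pvSegments (r :: t)).getLast?.map (fun p => p.1)) := by
            rw [hsegne]
            simp [PySem.Dict.update]
  | case3 first rest h ih =>
    intro hne d
    have hfirstne : first ≠ "" := hne first (by simp)
    have hstep : pvAStep (d, none) first = (d, none) := by
      simp [pvAStep, hfirstne, h]
    rw [pvSegments, if_neg h, List.foldl_cons, hstep]
    exact ih (fun x hx => hne x (by simp [hx])) d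

-- ===== VERDICT (by name: the statement is the Claim_ definition above) =====
theorem keybinds_serialiser_py_spec : Claim_equal_keybinds_serialiser_py := by
  intro lines _
  unfold Spec_keybinds_serialiser_py keybinds_serialiser_py keybinds_serialiser_py_alt
  rw [pvA_fold_filter, pvSegLoop_eq]
  have h := pvMain ((lines.map (fun l => PySem.Str.strip l)).filter (fun l => l ≠ ""))
    (by intro l hl; exact of_decide_eq_true (List.mem_filter.mp hl).2)
    PySem.Dict.empty
  rw [h]
  simp [PySem.Dict.ofList]
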